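-- pv_equiv track=rewrite | github.com/daniel-reich/ubiquitous-fiesta | bPzBa5JKvb6XFyKMs_1.py | get_primiera_score
-- ===== SOURCE A (Python) =====
-- def get_primiera_score(deck):
--   d = { "7" : 21, "6" : 18, "5" : 15, "4" : 14, "3" : 13, "2" : 12, "A" : 16, "K" : 10, "Q" : 10, "J" : 10}
--   arr = [0,0,0,0]
--   for c in deck:
--     val = d[c[0]]
--     if c[1] == 'd' and val > arr[0]: arr[0] = val
--     elif c[1] == 'h' and val > arr[1]: arr[1] = val
--     elif c[1] == 'c' and val > arr[2]: arr[2] = val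
--     elif c[1] == 's' and val > arr[3]: arr[3] = val
--
--   if 0 in arr: return 0
--   else : return sum(arr)
-- ===== SOURCE B (Python) =====
-- def get_primiera_score(deck):
--   d = { "7" : 21, "6" : 18, "5" : 15, "4" : 14, "3" : 13, "2" : 12, "A" : 16, "K" : 10, "Q" : 10, "J" : 10}
--   groups = {}
--   for c in deck:
--     groups.setdefault(c[1], []).append(d[c[0]])
--   scores = [max(groups.get(s, [0])) for s in 'dhcs']
--   return sum(scores) if all(scores) else 0
-- ===== Notes on version B (the rewrite author's own statement) =====
-- stated objective: alternative
-- what changed: Replaces the four running-maximum accumulators updated through an if/elif chain by a group-by pass (dict of per-suit value lists) followed by a separate max-per-group reduce pass.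
import Mathlib
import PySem

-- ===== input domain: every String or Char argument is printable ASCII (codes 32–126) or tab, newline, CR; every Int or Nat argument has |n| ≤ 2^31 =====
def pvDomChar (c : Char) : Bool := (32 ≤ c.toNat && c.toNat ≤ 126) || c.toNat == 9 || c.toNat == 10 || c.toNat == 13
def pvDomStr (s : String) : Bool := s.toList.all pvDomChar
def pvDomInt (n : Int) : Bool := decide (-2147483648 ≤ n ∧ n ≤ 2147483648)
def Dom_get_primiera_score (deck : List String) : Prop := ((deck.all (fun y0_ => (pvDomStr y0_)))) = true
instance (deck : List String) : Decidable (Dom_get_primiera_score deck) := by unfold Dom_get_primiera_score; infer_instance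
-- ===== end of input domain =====

-- B replaces A's four running-maximum accumulators (if/elif chain) by a group-by dict of
-- per-suit value lists plus a separate max-per-group reduce pass; same O(n) cost.


-- ===== PORT A =====
-- the rank-value dict d (keys are the one-char strings, compared as chars)
def pvRankDict : PySem.Dict Char Int :=
  PySem.Dict.ofList [('7', 21), ('6', 18), ('5', 15), ('4', 14), ('3', 13),
                     ('2', 12), ('A', 16), ('K', 10), ('Q', 10), ('J', 10)]

-- one iteration of A's loop; none threads a raised KeyError/IndexError
def pvAStep (st : Option (Int × Int × Int × Int)) (c : String) : Option (Int × Int × Int × Int) :=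
  match st with
  | none => none
  | some (a0, a1, a2, a3) =>
    match PySem.Str.pyGet? c 0 with
    | none => none
    | some r =>
      match pvRankDict.get? r with
      | none => none
      | some val =>
        match PySem.Str.pyGet? c 1 with
        | none => none
        | some s =>
          some (if s = 'd' ∧ val > a0 then (val, a1, a2, a3)
                else if s = 'h' ∧ val > a1 then (a0, val, a2, a3)
                else if s = 'c' ∧ val > a2 then (a0, a1, val, a3)
                else if s = 's' ∧ val > a3 then (a0, a1, a2, val)
                else (a0, a1, a2, a3))

def get_primiera_score (deck : List String) : Int :=
  match deck.foldl pvAStep (some (0, 0, 0, 0)) with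
  | none => 0   -- unreachable under Pre_ (Python raises there)
  | some (a0, a1, a2, a3) =>
    if a0 = 0 ∨ a1 = 0 ∨ a2 = 0 ∨ a3 = 0 then 0 else a0 + a1 + a2 + a3

-- ===== PORT B =====
-- one iteration of B's grouping loop: groups.setdefault(c[1], []).append(d[c[0]])
def pvBStep (st : Option (PySem.Dict Char (List Int))) (c : String) :
    Option (PySem.Dict Char (List Int)) :=
  match st with
  | none => none
  | some g =>
    match PySem.Str.pyGet? c 1 with
    | none => none
    | some s =>
      match PySem.Str.pyGet? c 0 with
      | none => none
      | some r =>
        match pvRankDict.get? r with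
        | none => none
        | some val => some (g.modify s [] (· ++ [val]))

-- max(l) for the never-empty lists B feeds it (groups.get(s, [0]))
def pvPyMax (l : List Int) : Int := (PySem.List.max? l (fun y => y)).getD 0

def get_primiera_score_alt (deck : List String) : Int :=
  match deck.foldl pvBStep (some PySem.Dict.empty) with
  | none => 0   -- unreachable under Pre_ (Python raises there)
  | some groups =>
    let scores := ['d', 'h', 'c', 's'].map (fun s => pvPyMax (groups.getD s [0]))
    if scores.all (fun x => x != 0) then scores.sum else 0

-- ===== PRECONDITION & SPEC =====
-- Pre_ excludes exactly the decks on which the Python A raises: a card shorter than two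
-- characters (IndexError) or whose first character is not a rank key (KeyError).
def Pre_get_primiera_score (deck : List String) : Prop :=
  deck.all (fun c =>
    match c.toList with
    | r :: _ :: _ => pvRankDict.contains r
    | _ => false) = true
instance (deck : List String) : Decidable (Pre_get_primiera_score deck) := by
  unfold Pre_get_primiera_score; infer_instance

def pvWitness_get_primiera_score : List String := ["7d", "Ah", "2c", "Ks", "Qx"]

def Spec_get_primiera_score (deck : List String) (out : Int) : Prop := out = get_primiera_score_alt deck
instance (deck : List String) (out : Int) : Decidable (Spec_get_primiera_score deck out) := by unfold Spec_get_primiera_score; infer_instance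

-- ===== CLAIM (what is proved, stated in full; the proofs are below) =====
def Claim_equal_get_primiera_score : Prop := ∀ (deck : List String), Dom_get_primiera_score deck → Pre_get_primiera_score deck → Spec_get_primiera_score deck (get_primiera_score deck)

-- ===== LEMMAS AND PROOFS =====

-- the (suit, value) pair a good card contributes
def pvPairOf (c : String) : Char × Int :=
  (c.toList.getD 1 ' ', pvRankDict.getD (c.toList.getD 0 ' ') 0)

def pvGood (c : String) : Bool :=
  match c.toList with
  | r :: _ :: _ => pvRankDict.contains r
  | _ => false

-- pure versions of the two loop bodies, on extracted pairs
def pvAPure (a : Int × Int × Int × Int) (p : Char × Int) : Int × Int × Int × Int :=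
  if p.1 = 'd' ∧ p.2 > a.1 then (p.2, a.2.1, a.2.2.1, a.2.2.2)
  else if p.1 = 'h' ∧ p.2 > a.2.1 then (a.1, p.2, a.2.2.1, a.2.2.2)
  else if p.1 = 'c' ∧ p.2 > a.2.2.1 then (a.1, a.2.1, p.2, a.2.2.2)
  else if p.1 = 's' ∧ p.2 > a.2.2.2 then (a.1, a.2.1, a.2.2.1, p.2)
  else a

lemma pvRank_get (r : Char) (hc : pvRankDict.contains r = true) :
    pvRankDict.get? r = some (pvRankDict.getD r 0) ∧ 0 < pvRankDict.getD r 0 := by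
  have hs : (pvRankDict.get? r).isSome := by
    rw [← PySem.Dict.contains_eq_isSome_get?]; exact hc
  obtain ⟨v, hv⟩ := Option.isSome_iff_exists.mp hs
  have hg : pvRankDict.getD r 0 = v := by
    rw [PySem.Dict.getD_eq_get?_getD, hv]; rfl
  refine ⟨by rw [hg, hv], ?_⟩
  rw [hg]
  have hmem : (r, v) ∈ pvRankDict.items := by
    apply PySem.Dict.mem_items_of_get?_eq_some
    exact hv
  have hall : ∀ p ∈ pvRankDict.items, 0 < p.2 := by decide
  exact hall _ hmem

lemma pvAStep_good (c : String) (hc : pvGood c = true) (a : Int × Int × Int × Int) :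
    pvAStep (some a) c = some (pvAPure a (pvPairOf c)) := by
  unfold pvGood at hc
  obtain ⟨a0, a1, a2, a3⟩ := a
  match hL : c.toList with
  | [] => rw [hL] at hc; simp at hc
  | [r] => rw [hL] at hc; simp at hc
  | r :: s :: rest =>
    rw [hL] at hc
    have hget := (pvRank_get r hc).1
    simp [pvAStep, pvAPure, pvPairOf, hL, hget]

lemma pvBStep_good (c : String) (hc : pvGood c = true) (g : PySem.Dict Char (List Int)) :
    pvBStep (some g) c = some (g.modify (pvPairOf c).1 [] (· ++ [(pvPairOf c).2])) := by
  unfold pvGood at hc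
  match hL : c.toList with
  | [] => rw [hL] at hc; simp at hc
  | [r] => rw [hL] at hc; simp at hc
  | r :: s :: rest =>
    rw [hL] at hc
    have hget := (pvRank_get r hc).1
    simp [pvBStep, pvPairOf, hL, hget]

lemma pvAfold (deck : List String) (hPre : ∀ c ∈ deck, pvGood c = true)
    (a : Int × Int × Int × Int) :
    deck.foldl pvAStep (some a) = some ((deck.map pvPairOf).foldl pvAPure a) := by
  induction deck generalizing a with
  | nil => rfl
  | cons c t ih =>
    have hc := hPre c (by simp)
    simp only [List.foldl_cons, List.map_cons, pvAStep_good c hc a]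
    exact ih (fun x hx => hPre x (by simp [hx])) _

lemma pvBfold (deck : List String) (hPre : ∀ c ∈ deck, pvGood c = true)
    (g : PySem.Dict Char (List Int)) :
    deck.foldl pvBStep (some g) =
      some ((deck.map pvPairOf).foldl (fun d p => d.modify p.1 [] (· ++ [p.2])) g) := by
  induction deck generalizing g with
  | nil => rfl
  | cons c t ih =>
    have hc := hPre c (by simp)
    simp only [List.foldl_cons, List.map_cons, pvBStep_good c hc g]
    exact ih (fun x hx => hPre x (by simp [hx])) _

-- componentwise reading of the pure A fold: each suit is an independent running max
def pvMaxFor (s0 : Char) (pairs : List (Char × Int)) (a : Int) : Int :=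
  pairs.foldl (fun a p => if p.1 = s0 ∧ p.2 > a then p.2 else a) a

lemma pvAPure_components (pairs : List (Char × Int)) (a : Int × Int × Int × Int) :
    pairs.foldl pvAPure a =
      (pvMaxFor 'd' pairs a.1, pvMaxFor 'h' pairs a.2.1,
       pvMaxFor 'c' pairs a.2.2.1, pvMaxFor 's' pairs a.2.2.2) := by
  induction pairs generalizing a with
  | nil => rfl
  | cons p t ih =>
    obtain ⟨a0, a1, a2, a3⟩ := a
    simp only [List.foldl_cons, pvMaxFor, ih]
    congr 1 <;> [skip; congr 1] <;> [skip; skip; congr 1] <;>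
      · simp only [pvAPure]
        split_ifs with h1 h2 h3 h4 <;> simp_all

lemma pvMaxFor_cons (s0 : Char) (p : Char × Int) (t : List (Char × Int)) (a : Int) :
    pvMaxFor s0 (p :: t) a = pvMaxFor s0 t (if p.1 = s0 ∧ p.2 > a then p.2 else a) := rfl

lemma pvMaxFor_filter (s0 : Char) (pairs : List (Char × Int)) (a : Int) :
    pvMaxFor s0 pairs a =
      ((pairs.filter (·.1 == s0)).map (·.2)).foldl max a := by
  induction pairs generalizing a with
  | nil => rfl
  | cons p t ih =>
    rw [pvMaxFor_cons, ih, List.filter_cons]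
    by_cases h : p.1 = s0
    · simp only [h, BEq.rfl, if_pos, List.map_cons, List.foldl_cons]
      congr 1
      simp only [true_and]
      split_ifs with hv <;> omega
    · have hb : (p.1 == s0) = false := by simp [h]
      simp [hb, h]

lemma pvVals_pos (deck : List String) (hPre : ∀ c ∈ deck, pvGood c = true) :
    ∀ p ∈ deck.map pvPairOf, 0 < p.2 := by
  intro p hp
  simp only [List.mem_map] at hp
  obtain ⟨c, hc, rfl⟩ := hp
  have hg := hPre c hc
  unfold pvGood at hg
  match hL : c.toList with
  | [] => rw [hL] at hg; simp at hg
  | [r] => rw [hL] at hg; simp at hg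
  | r :: s :: rest =>
    rw [hL] at hg
    simp only [pvPairOf, hL, List.getD_cons_succ, List.getD_cons_zero]
    exact (pvRank_get r hg).2

-- the per-suit score B computes equals the per-suit running max A keeps
lemma pvScore_eq (s0 : Char) (pairs : List (Char × Int))
    (hpos : ∀ p ∈ pairs, 0 < p.2) :
    pvPyMax ((pairs.foldl (fun d p => d.modify p.1 [] (· ++ [p.2]))
        PySem.Dict.empty).getD s0 [0]) = pvMaxFor s0 pairs 0 := by
  have hfilter : (pairs.foldl (fun d p => d.modify p.1 [] (· ++ [p.2]))
      PySem.Dict.empty).getD s0 [] = (pairs.filter (·.1 == s0)).map (·.2) := by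
    have := PySem.Dict.getD_foldl_modify_append (l := pairs)
      (d := PySem.Dict.empty) (c := s0)
    simpa using this
  rw [pvMaxFor_filter]
  set L := (pairs.filter (·.1 == s0)).map (·.2) with hLdef
  set g := pairs.foldl (fun d p => d.modify p.1 [] (· ++ [p.2])) PySem.Dict.empty
  have hLpos : ∀ v ∈ L, 0 < v := by
    intro v hv
    simp only [hLdef, List.mem_map, List.mem_filter] at hv
    obtain ⟨p, ⟨hp, _⟩, rfl⟩ := hv
    exact hpos p hp
  rw [PySem.Dict.getD_eq_get?_getD] at hfilter
  rw [PySem.Dict.getD_eq_get?_getD]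
  cases hgs : g.get? s0 with
  | none =>
    rw [hgs] at hfilter
    simp only [Option.getD_none] at hfilter ⊢
    rw [← hfilter]
    simp [pvPyMax, PySem.List.max?_id_cons]
  | some l =>
    rw [hgs] at hfilter
    simp only [Option.getD_some] at hfilter ⊢
    subst hfilter
    cases hl : L with
    | nil => simp [pvPyMax, PySem.List.max?]
    | cons x t =>
      have hx : 0 < x := hLpos x (by simp [hl])
      simp only [pvPyMax, PySem.List.max?_id_cons, Option.getD_some,
        List.foldl_cons]
      congr 1
      omega

-- ===== VERDICT (by name: the statement is the Claim_ definition above) =====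
theorem get_primiera_score_spec : Claim_equal_get_primiera_score := by
  intro deck _ hPre
  have hPre' : ∀ c ∈ deck, pvGood c = true := by
    intro c hc
    unfold Pre_get_primiera_score at hPre
    rw [List.all_eq_true] at hPre
    exact hPre c hc
  unfold Spec_get_primiera_score get_primiera_score get_primiera_score_alt
  rw [pvAfold deck hPre', pvBfold deck hPre']
  set pairs := deck.map pvPairOf with hpairs
  have hpos := pvVals_pos deck hPre'
  rw [pvAPure_components]
  simp only [List.map_cons, List.map_nil]
  rw [pvScore_eq 'd' pairs hpos, pvScore_eq 'h' pairs hpos,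
      pvScore_eq 'c' pairs hpos, pvScore_eq 's' pairs hpos]
  set md := pvMaxFor 'd' pairs 0
  set mh := pvMaxFor 'h' pairs 0
  set mc := pvMaxFor 'c' pairs 0
  set ms := pvMaxFor 's' pairs 0
  simp only [List.all_cons, List.all_nil, List.sum_cons, List.sum_nil, bne_iff_ne,
    Bool.and_eq_true, ne_eq, Bool.and_true]
  split_ifs with h1 h2 h2 <;> simp_all <;> omega
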